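-- pv_equiv track=rewrite | github.com/linjiaxx/stock-dashboard | scripts/wave_analysis.py | find_peaks_and_troughs
-- ===== SOURCE A (Python) =====
-- def find_peaks_and_troughs(prices, sensitivity=2):
--     """
--     找到局部极值点（峰=高点, 谷=低点）
--     sensitivity: 窗口大小，越大越不敏感
--     """
--     n = len(prices)
--     peaks   = []   # index of peaks (local max)
--     troughs = []   # index of troughs (local min)
--
--     for i in range(sensitivity, n - sensitivity):
--         window = prices[i - sensitivity:i + sensitivity + 1]
--         if prices[i] == max(window):
--             peaks.append(i)
--         if prices[i] == min(window):
--             troughs.append(i)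
--     return peaks, troughs
-- ===== SOURCE B (Python) =====
-- def find_peaks_and_troughs(prices, sensitivity=2):
--     """
--     找到局部极值点（峰=高点, 谷=低点）
--     sensitivity: 窗口大小，越大越不敏感
--     """
--     n = len(prices)
--     peaks, troughs = [], []
--     w = 2 * sensitivity + 1          # window size
--     maxq, hmax = [], 0               # monotonic deque (indices, values decreasing), head pointer
--     minq, hmin = [], 0               # monotonic deque (indices, values increasing), head pointer
--     for r in range(n):
--         v = prices[r]
--         while len(maxq) > hmax and prices[maxq[-1]] <= v:
--             maxq.pop()
--         maxq.append(r)
--         while len(minq) > hmin and prices[minq[-1]] >= v: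
--             minq.pop()
--         minq.append(r)
--         left = r - w + 1
--         if maxq[hmax] < left:
--             hmax += 1
--         if minq[hmin] < left:
--             hmin += 1
--         if left >= 0:
--             i = r - sensitivity      # center of the full window [left, r]
--             p = prices[i]
--             if p == prices[maxq[hmax]]:
--                 peaks.append(i)
--             if p == prices[minq[hmin]]:
--                 troughs.append(i)
--     return peaks, troughs
-- ===== Notes on version B (the rewrite author's own statement) =====
-- stated objective: alternative
-- what changed: Replaces A's per-index window slice with max()/min() recomputation by a single pass maintaining two monotonic deques (lists with head pointers) whose fronts hold the sliding-window maximum and minimum, so each element is pushed and popped at most once.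
import Mathlib
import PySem

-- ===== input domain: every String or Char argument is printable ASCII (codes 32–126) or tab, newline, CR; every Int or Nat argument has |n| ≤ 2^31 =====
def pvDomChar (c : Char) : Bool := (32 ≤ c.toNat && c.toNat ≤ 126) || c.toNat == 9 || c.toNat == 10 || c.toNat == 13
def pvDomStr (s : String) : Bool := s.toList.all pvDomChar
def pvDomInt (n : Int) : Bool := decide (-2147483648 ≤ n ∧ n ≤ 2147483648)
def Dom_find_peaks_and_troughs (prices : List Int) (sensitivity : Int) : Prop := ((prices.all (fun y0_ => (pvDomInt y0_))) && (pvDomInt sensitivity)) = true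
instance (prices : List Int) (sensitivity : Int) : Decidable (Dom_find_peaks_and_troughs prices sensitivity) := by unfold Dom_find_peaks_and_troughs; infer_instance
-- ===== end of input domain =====

-- B replaces A's per-index window slice + max()/min() recomputation by one pass with two
-- monotonic deques whose fronts are the sliding-window extrema (alternative algorithm).


-- ===== PORT A =====
-- literal port of A: one loop over range(sensitivity, n - sensitivity); each step slices the
-- window prices[i-sensitivity : i+sensitivity+1] and compares prices[i] with max/min of it.
-- (max()/min() of an empty window raises in Python: the 'none' branch keeps acc and is
-- excluded by Pre_; prices[i] is always in range there, so pyGetD's default never fires.)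
def find_peaks_and_troughs (prices : List Int) (sensitivity : Int) : List Int × List Int :=
  let n : Int := prices.length
  (PySem.List.pyRange sensitivity (n - sensitivity) 1).foldl
    (fun acc i =>
      let window := PySem.List.slice prices (some (i - sensitivity)) (some (i + sensitivity + 1))
      let peaks :=
        match PySem.List.max? window (fun x => x) with
        | some m => if PySem.List.pyGetD prices i 0 = m then acc.1 ++ [i] else acc.1
        | none => acc.1
      let troughs :=
        match PySem.List.min? window (fun x => x) with
        | some m => if PySem.List.pyGetD prices i 0 = m then acc.2 ++ [i] else acc.2
        | none => acc.2
      (peaks, troughs))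
    ([], [])

-- ===== PORT B =====
-- literal port of Source B: a single pass r = 0..n-1 maintaining two monotonic deques
-- (index lists maxq/minq with head pointers hmax/hmin); pvPopWhile is the
-- 'while len(q) > h and prices[q[-1]] <=/>= v: q.pop()' loop (the length test is written
-- h.toNat < q.length, which equals Python's len(q) > h on the 0 ≤ h states the loop runs in);
-- once the window is full (left ≥ 0) its center is compared with the deque fronts.
def pvPopWhile (h : Int) (cond : Int → Bool) (q : List Int) : List Int :=
  if hq : h.toNat < q.length then
    if cond (q.getLastD 0) then pvPopWhile h cond q.dropLast else q
  else q
termination_by q.length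
decreasing_by simp only [List.length_dropLast]; omega

-- the body of Source B's for-loop; state = (maxq, hmax, minq, hmin, peaks, troughs)
def pvStepB (prices : List Int) (s w : Int)
    (st : List Int × Int × List Int × Int × List Int × List Int) (r : Int) :
    List Int × Int × List Int × Int × List Int × List Int :=
  match st with
  | (maxq, hmax, minq, hmin, peaks, troughs) =>
    let v := PySem.List.pyGetD prices r 0
    let maxq := pvPopWhile hmax (fun j => decide (PySem.List.pyGetD prices j 0 ≤ v)) maxq ++ [r]
    let minq := pvPopWhile hmin (fun j => decide (v ≤ PySem.List.pyGetD prices j 0)) minq ++ [r]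
    let left := r - w + 1
    let hmax := if PySem.List.pyGetD maxq hmax 0 < left then hmax + 1 else hmax
    let hmin := if PySem.List.pyGetD minq hmin 0 < left then hmin + 1 else hmin
    if 0 ≤ left then
      let i := r - s
      let p := PySem.List.pyGetD prices i 0
      let peaks := if p = PySem.List.pyGetD prices (PySem.List.pyGetD maxq hmax 0) 0 then peaks ++ [i] else peaks
      let troughs := if p = PySem.List.pyGetD prices (PySem.List.pyGetD minq hmin 0) 0 then troughs ++ [i] else troughs
      (maxq, hmax, minq, hmin, peaks, troughs)
    else (maxq, hmax, minq, hmin, peaks, troughs)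

def find_peaks_and_troughs_alt (prices : List Int) (sensitivity : Int) : List Int × List Int :=
  let n : Int := prices.length
  let w : Int := 2 * sensitivity + 1
  let st := (PySem.List.pyRange 0 n 1).foldl (pvStepB prices sensitivity w) ([], 0, [], 0, [], [])
  (st.2.2.2.2.1, st.2.2.2.2.2)

-- ===== PRECONDITION & SPEC =====
-- For sensitivity < 0 every window slice is empty and Python A raises ValueError taking max() of it;
-- Pre_ excludes exactly those inputs (for 0 ≤ sensitivity A always returns).
def Pre_find_peaks_and_troughs (prices : List Int) (sensitivity : Int) : Prop :=
  0 ≤ sensitivity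
instance (prices : List Int) (sensitivity : Int) : Decidable (Pre_find_peaks_and_troughs prices sensitivity) := by unfold Pre_find_peaks_and_troughs; infer_instance

def pvWitness_find_peaks_and_troughs : List Int × Int := ([1, 3, 2, 5, 4, 4, 1], 2)

def Spec_find_peaks_and_troughs (prices : List Int) (sensitivity : Int) (out : List Int × List Int) : Prop := out = find_peaks_and_troughs_alt prices sensitivity
instance (prices : List Int) (sensitivity : Int) (out : List Int × List Int) : Decidable (Spec_find_peaks_and_troughs prices sensitivity out) := by unfold Spec_find_peaks_and_troughs; infer_instance

-- ===== CLAIM (what is proved, stated in full; the proofs are below) =====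
def Claim_equal_find_peaks_and_troughs : Prop := ∀ (prices : List Int) (sensitivity : Int), Dom_find_peaks_and_troughs prices sensitivity → Pre_find_peaks_and_troughs prices sensitivity → Spec_find_peaks_and_troughs prices sensitivity (find_peaks_and_troughs prices sensitivity)

-- ===== LEMMAS AND PROOFS =====

-- the common characterisation both programs are reduced to: index i is kept iff its value
-- weakly dominates (resp. is dominated by) every value in the window [i-s, i+s]
def pvPeak (prices : List Int) (s i : Int) : Bool :=
  (PySem.List.pyRange (i - s) (i + s + 1) 1).all
    (fun j => decide (PySem.List.pyGetD prices j 0 ≤ PySem.List.pyGetD prices i 0))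
def pvTrough (prices : List Int) (s i : Int) : Bool :=
  (PySem.List.pyRange (i - s) (i + s + 1) 1).all
    (fun j => decide (PySem.List.pyGetD prices i 0 ≤ PySem.List.pyGetD prices j 0))

-- ---------- A-side: A equals the filter characterisation ----------

-- the window slice is exactly the neighbour values of the characterisation, in order
lemma pv_window_eq (prices : List Int) (s i : Int) (hs : 0 ≤ s) (hi : s ≤ i)
    (hin : i < (prices.length : Int) - s) :
    PySem.List.slice prices (some (i - s)) (some (i + s + 1))
      = (PySem.List.pyRange (i - s) (i + s + 1) 1).map (fun j => PySem.List.pyGetD prices j 0) := by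
  rw [PySem.List.slice_toNat prices (by omega) (by omega), PySem.List.pyRange_one, List.map_map]
  apply List.ext_getElem
  · simp only [List.length_take, List.length_drop, List.length_map, List.length_range]
    omega
  · intro k h1 h2
    simp only [List.getElem_take, List.getElem_drop, List.getElem_map, List.getElem_range,
      Function.comp]
    have heq : i - s + (k : Int) = ((((i - s).toNat + k : Nat)) : Int) := by
      push_cast; omega
    rw [heq, PySem.List.pyGetD_natCast]
    have hlt : (i - s).toNat + k < prices.length := by
      simp only [List.length_take, List.length_drop] at h1; omega
    rw [List.getD_eq_getElem _ _ hlt]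

-- p == max(w) is 'p dominates every element of w' once p ∈ w (and likewise for min)
lemma pv_max_eq_iff (w : List Int) (p m : Int) (hp : p ∈ w)
    (hm : PySem.List.max? w (fun x => x) = some m) : p = m ↔ ∀ q ∈ w, q ≤ p := by
  constructor
  · rintro rfl q hq
    exact PySem.List.max?_isMax hm q hq
  · intro hall
    exact le_antisymm (PySem.List.max?_isMax hm p hp) (hall m (PySem.List.max?_mem hm))

lemma pv_min_eq_iff (w : List Int) (p m : Int) (hp : p ∈ w)
    (hm : PySem.List.min? w (fun x => x) = some m) : p = m ↔ ∀ q ∈ w, p ≤ q := by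
  constructor
  · rintro rfl q hq
    exact PySem.List.min?_isMin hm q hq
  · intro hall
    exact le_antisymm (hall m (PySem.List.min?_mem hm)) (PySem.List.min?_isMin hm p hp)

-- one iteration of A's loop is one 'kept or not' decision of each filter
lemma pv_stepA (prices : List Int) (s : Int) (hs : 0 ≤ s) (acc : List Int × List Int) (i : Int)
    (hi : s ≤ i) (hin : i < (prices.length : Int) - s) :
    (let window := PySem.List.slice prices (some (i - s)) (some (i + s + 1))
     let peaks :=
       match PySem.List.max? window (fun x => x) with
       | some m => if PySem.List.pyGetD prices i 0 = m then acc.1 ++ [i] else acc.1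
       | none => acc.1
     let troughs :=
       match PySem.List.min? window (fun x => x) with
       | some m => if PySem.List.pyGetD prices i 0 = m then acc.2 ++ [i] else acc.2
       | none => acc.2
     (peaks, troughs))
    = ((if pvPeak prices s i then acc.1 ++ [i] else acc.1),
       (if pvTrough prices s i then acc.2 ++ [i] else acc.2)) := by
  have hw := pv_window_eq prices s i hs hi hin
  dsimp only
  rw [hw]
  have hpi : PySem.List.pyGetD prices i 0
      ∈ (PySem.List.pyRange (i - s) (i + s + 1) 1).map (fun j => PySem.List.pyGetD prices j 0) :=
    List.mem_map_of_mem (PySem.List.mem_pyRange_one.mpr ⟨by omega, by omega⟩)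
  rcases hm : PySem.List.max? ((PySem.List.pyRange (i - s) (i + s + 1) 1).map
      (fun j => PySem.List.pyGetD prices j 0)) (fun x => x) with _ | m
  · exact absurd ((PySem.List.max?_eq_none_iff _ _).mp hm) (List.ne_nil_of_mem hpi)
  rcases hn : PySem.List.min? ((PySem.List.pyRange (i - s) (i + s + 1) 1).map
      (fun j => PySem.List.pyGetD prices j 0)) (fun x => x) with _ | m'
  · exact absurd ((PySem.List.min?_eq_none_iff _ _).mp hn) (List.ne_nil_of_mem hpi)
  have h1 : (PySem.List.pyGetD prices i 0 = m) ↔ (pvPeak prices s i = true) := by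
    rw [pv_max_eq_iff _ _ _ hpi hm]
    simp only [pvPeak, List.all_eq_true, List.mem_map, forall_exists_index, and_imp,
      PySem.List.mem_pyRange_one, decide_eq_true_eq]
    exact ⟨fun h x ha hb => h _ x ha hb rfl, fun h q x ha hb e => e ▸ h x ha hb⟩
  have h2 : (PySem.List.pyGetD prices i 0 = m') ↔ (pvTrough prices s i = true) := by
    rw [pv_min_eq_iff _ _ _ hpi hn]
    simp only [pvTrough, List.all_eq_true, List.mem_map, forall_exists_index, and_imp,
      PySem.List.mem_pyRange_one, decide_eq_true_eq]
    exact ⟨fun h x ha hb => h _ x ha hb rfl, fun h q x ha hb e => e ▸ h x ha hb⟩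
  refine Prod.ext ?_ ?_ <;> dsimp only
  · rw [if_congr h1 rfl rfl]
  · rw [if_congr h2 rfl rfl]

-- the interleaved append fold is the pair of filters
lemma pv_foldl_pair_filter (l : List Int) (c1 c2 : Int → Bool) (a b : List Int) :
    l.foldl (fun acc i =>
      ((if c1 i then acc.1 ++ [i] else acc.1), (if c2 i then acc.2 ++ [i] else acc.2))) (a, b)
      = (a ++ l.filter c1, b ++ l.filter c2) := by
  induction l generalizing a b with
  | nil => simp
  | cons x t ih =>
    simp only [List.foldl_cons, List.filter_cons]
    split_ifs <;> simp [ih]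

lemma pv_A_eq_filter (prices : List Int) (s : Int) (hs : 0 ≤ s) :
    find_peaks_and_troughs prices s
      = ((PySem.List.pyRange s ((prices.length : Int) - s) 1).filter (pvPeak prices s),
         (PySem.List.pyRange s ((prices.length : Int) - s) 1).filter (pvTrough prices s)) := by
  unfold find_peaks_and_troughs
  dsimp only
  rw [PySem.List.foldl_congr_mem _ _
      (fun acc i =>
        ((if pvPeak prices s i then acc.1 ++ [i] else acc.1),
         (if pvTrough prices s i then acc.2 ++ [i] else acc.2)))
      ([], [])
      (fun acc x hx =>
        pv_stepA prices s hs acc x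
          (PySem.List.mem_pyRange_one.mp hx).1
          (by have := (PySem.List.mem_pyRange_one.mp hx).2; omega))]
  rw [pv_foldl_pair_filter]
  simp

-- ---------- B-side: the monotonic-deque pass equals the same characterisation ----------

-- the live indices of a monotonic deque over processed indices [0, e) with window low end lo:
-- those j that strictly dominate (under the value map g) everything after them
def pvAct (g : Int → Int) (lo e : Int) : List Int :=
  (PySem.List.pyRange lo e 1).filter
    (fun j => (PySem.List.pyRange (j + 1) e 1).all (fun k => decide (g k < g j)))

lemma pv_mem_pvAct (g : Int → Int) (lo e j : Int) :
    j ∈ pvAct g lo e ↔ (lo ≤ j ∧ j < e) ∧ ∀ k, j < k → k < e → g k < g j := by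
  simp only [pvAct, List.mem_filter, PySem.List.mem_pyRange_one, List.all_eq_true,
    decide_eq_true_eq]
  constructor
  · rintro ⟨h1, h2⟩
    exact ⟨h1, fun k hk1 hk2 => h2 k ⟨by omega, hk2⟩⟩
  · rintro ⟨h1, h2⟩
    exact ⟨h1, fun k hk => h2 k (by omega) hk.2⟩

lemma pv_pvAct_sorted (g : Int → Int) (lo e : Int) : (pvAct g lo e).Pairwise (· < ·) :=
  (PySem.List.pairwise_lt_pyRange_one lo e).filter _

lemma pv_pvAct_anti (g : Int → Int) (lo e : Int) :
    (pvAct g lo e).Pairwise (fun a b => g b < g a) := by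
  refine List.Pairwise.imp_of_mem ?_ (pv_pvAct_sorted g lo e)
  intro a b ha hb hab
  have hb' := (pv_mem_pvAct g lo e b).mp hb
  have ha' := (pv_mem_pvAct g lo e a).mp ha
  exact ha'.2 b hab hb'.1.2

-- every window element has a live dominator at or after it
lemma pv_pvAct_dom_aux (g : Int → Int) (lo e : Int) :
    ∀ (d : Nat) (k : Int), (e - 1 - k).toNat = d → lo ≤ k → k < e →
      ∃ j, j ∈ pvAct g lo e ∧ k ≤ j ∧ g k ≤ g j := by
  intro d
  induction d using Nat.strong_induction_on with
  | _ d ih =>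
    intro k hd hlo hke
    by_cases hk : ∀ k', k < k' → k' < e → g k' < g k
    · exact ⟨k, (pv_mem_pvAct g lo e k).mpr ⟨⟨hlo, hke⟩, hk⟩, le_refl _, le_refl _⟩
    · push_neg at hk
      obtain ⟨k', hk1, hk2, hk3⟩ := hk
      obtain ⟨j, hj, hj1, hj2⟩ := ih (e - 1 - k').toNat (by omega) k' rfl (by omega) hk2
      exact ⟨j, hj, by omega, le_trans hk3 hj2⟩

-- the deque front: first live index; its value dominates the whole window
lemma pv_pvAct_head (g : Int → Int) (lo e : Int) (hlt : lo < e) :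
    ∃ a t, pvAct g lo e = a :: t ∧ (lo ≤ a ∧ a < e) ∧
      (∀ k, lo ≤ k → k < e → g k ≤ g a) := by
  have hne : pvAct g lo e ≠ [] := by
    intro h
    have : (e - 1) ∈ pvAct g lo e :=
      (pv_mem_pvAct g lo e (e - 1)).mpr ⟨⟨by omega, by omega⟩, fun k h1 h2 => by omega⟩
    rw [h] at this; exact absurd this (List.not_mem_nil)
  obtain ⟨a, t, hat⟩ := List.exists_cons_of_ne_nil hne
  have ha : a ∈ pvAct g lo e := by rw [hat]; exact List.mem_cons_self
  have ha' := (pv_mem_pvAct g lo e a).mp ha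
  refine ⟨a, t, hat, ha'.1, fun k hk1 hk2 => ?_⟩
  obtain ⟨j, hj, hj1, hj2⟩ := pv_pvAct_dom_aux g lo e (e - 1 - k).toNat k rfl hk1 hk2
  rcases List.mem_cons.mp (hat ▸ hj) with h | h
  · exact h ▸ hj2
  · have hlt2 : a < j := by
      have := pv_pvAct_sorted g lo e
      rw [hat] at this
      exact (List.pairwise_cons.mp this).1 j h
    have := pv_pvAct_anti g lo e
    rw [hat] at this
    have := (List.pairwise_cons.mp this).1 j h
    exact le_trans hj2 (le_of_lt this)

-- raising the window low end = filtering the live list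
lemma pv_pvAct_mono_lo (g : Int → Int) (lo lo' e : Int) (h1 : lo ≤ lo') (h2 : lo' ≤ e) :
    pvAct g lo' e = (pvAct g lo e).filter (fun j => decide (lo' ≤ j)) := by
  unfold pvAct
  rw [List.filter_filter, PySem.List.pyRange_one_append lo lo' e h1 h2, List.filter_append]
  have hnil : (PySem.List.pyRange lo lo' 1).filter
      (fun a => decide (lo' ≤ a)
        && (PySem.List.pyRange (a + 1) e 1).all (fun k => decide (g k < g a))) = [] := by
    apply List.filter_eq_nil_iff.mpr
    intro a ha
    have := PySem.List.mem_pyRange_one.mp ha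
    simp only [Bool.and_eq_true, decide_eq_true_eq]
    rintro ⟨h, -⟩; omega
  rw [hnil, List.nil_append]
  apply List.filter_congr
  intro a ha
  have := PySem.List.mem_pyRange_one.mp ha
  simp [this.1]

-- extending the processed prefix by index e: pop the dominated suffix, push e
lemma pv_pvAct_succ (g : Int → Int) (lo e : Int) (h1 : lo ≤ e) :
    pvAct g lo (e + 1) = (pvAct g lo e).filter (fun j => decide (g e < g j)) ++ [e] := by
  unfold pvAct
  rw [PySem.List.pyRange_one_succ_right h1, List.filter_append, List.filter_filter]
  congr 1
  · apply List.filter_congr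
    intro j hj
    have hj' := PySem.List.mem_pyRange_one.mp hj
    rw [PySem.List.pyRange_one_succ_right (by omega : j + 1 ≤ e), List.all_append]
    simp [Bool.and_comm]
  · simp [PySem.List.pyRange_one_eq_nil (by omega : e + 1 ≤ e + 1)]

-- pvPopWhile is take-head-part ++ drop-back-while on the live part
lemma pv_pvPopWhile_eq (cond : Int → Bool) (h : Int) :
    ∀ (fuel : Nat) (q : List Int), q.length ≤ fuel →
      pvPopWhile h cond q = q.take h.toNat ++ ((q.drop h.toNat).reverse.dropWhile cond).reverse := by
  intro fuel
  induction fuel with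
  | zero =>
    intro q hq
    have : q = [] := List.length_eq_zero_iff.mp (by omega)
    subst this
    rw [pvPopWhile]; simp
  | succ f ihf =>
    intro q hq
    rw [pvPopWhile]
    by_cases hlen : h.toNat < q.length
    · have hne : q ≠ [] := by intro h0; subst h0; simp at hlen
      have hlast : q.getLastD 0 = q.getLast hne := by
        rw [List.getLastD_eq_getLast?, List.getLast?_eq_some_getLast hne]; rfl
      have hdne : q.drop h.toNat ≠ [] := by
        intro h0
        have := List.drop_eq_nil_iff.mp h0; omega
      have hdlast : (q.drop h.toNat).getLast hdne = q.getLast hne := by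
        rw [List.getLast_drop]
      have hsplit : q.drop h.toNat = (q.drop h.toNat).dropLast ++ [q.getLast hne] := by
        conv_lhs => rw [← List.dropLast_append_getLast hdne]
        rw [hdlast]
      have hrev : (q.drop h.toNat).reverse
          = q.getLast hne :: (q.drop h.toNat).dropLast.reverse := by
        conv_lhs => rw [hsplit]
        simp [List.reverse_append]
      by_cases hc : cond (q.getLastD 0)
      · simp only [hlen, dif_pos, hc, if_pos]
        rw [ihf q.dropLast (by simp only [List.length_dropLast]; omega)]
        have htake : q.dropLast.take h.toNat = q.take h.toNat := by
          rw [List.dropLast_eq_take, List.take_take]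
          congr 1; omega
        have hdrop : q.dropLast.drop h.toNat = (q.drop h.toNat).dropLast := by
          apply List.ext_getElem
          · simp [List.length_dropLast, List.length_drop]; omega
          · intro k h1 h2
            simp only [List.getElem_drop, List.getElem_dropLast]
        rw [htake, hdrop]
        congr 2
        rw [hlast] at hc
        rw [hrev, List.dropWhile_cons, if_pos (by simp [hc])]
      · simp only [hlen, dif_pos, hc, if_neg, Bool.false_eq_true, not_false_iff]
        rw [hlast] at hc
        have hstop : (List.dropWhile cond (q.drop h.toNat).reverse).reverse
            = q.drop h.toNat := by
          rw [hrev, List.dropWhile_cons, if_neg (by simp [hc]), ← hrev, List.reverse_reverse]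
        rw [hstop, List.take_append_drop]
    · simp only [hlen, dif_neg, not_false_iff]
      rw [List.take_of_length_le (by omega), List.drop_eq_nil_of_le (by omega)]
      simp

-- dropping a ≤-c prefix of a strictly g-increasing list is filtering for > c
lemma pv_dropWhile_incr (g : Int → Int) (c : Int) :
    ∀ (l : List Int), l.Pairwise (fun a b => g a < g b) →
      l.dropWhile (fun j => decide (g j ≤ c)) = l.filter (fun j => decide (c < g j)) := by
  intro l
  induction l with
  | nil => simp
  | cons a t ih =>
    intro hp
    have hp' := List.pairwise_cons.mp hp
    by_cases hc : g a ≤ c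
    · rw [List.dropWhile_cons, if_pos (by simpa using hc), List.filter_cons,
        if_neg (by simpa using not_lt.mpr hc)]
      exact ih hp'.2
    · rw [List.dropWhile_cons, if_neg (by simpa using hc), List.filter_cons,
        if_pos (by simpa using not_le.mp hc)]
      congr 1
      symm
      apply List.filter_eq_self.mpr
      intro b hb
      have := hp'.1 b hb
      simp only [decide_eq_true_eq]
      omega

-- the pop loop applied to a live deque: remove exactly the values ≤ g m, keep the head part
lemma pv_pop_drop (g : Int → Int) (m h : Int) (q : List Int) (lo e : Int)
    (hh : 0 ≤ h) (hlen : h.toNat ≤ q.length)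
    (hq : q.drop h.toNat = pvAct g lo e) :
    pvPopWhile h (fun j => decide (g j ≤ g m)) q
      = q.take h.toNat ++ (pvAct g lo e).filter (fun j => decide (g m < g j)) := by
  rw [pv_pvPopWhile_eq (fun j => decide (g j ≤ g m)) h q.length q (le_refl _), hq]
  congr 1
  rw [pv_dropWhile_incr g (g m) _
    (by rw [List.pairwise_reverse]; exact pv_pvAct_anti g lo e),
    ← List.filter_reverse, List.reverse_reverse]

-- reading the deque front through the head pointer
lemma pv_front (q : List Int) (h : Int) (a : Int) (t : List Int)
    (hh : 0 ≤ h) (hq : q.drop h.toNat = a :: t) :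
    PySem.List.pyGetD q h 0 = a := by
  have hlt : h.toNat < q.length := by
    by_contra hc
    rw [List.drop_eq_nil_of_le (by omega)] at hq
    exact List.cons_ne_nil a t hq.symm
  rw [PySem.List.pyGetD_eq_getElem q 0 hh (by omega)]
  have : q[h.toNat]'hlt = (q.drop h.toNat)[0]'(by simp [List.length_drop]; omega) := by
    rw [List.getElem_drop]; simp
  rw [this]
  simp [hq]

-- one whole deque update (pop + push + front prune) preserves the live-list invariant
lemma pv_dstep (g : Int → Int) (w m h : Int) (q : List Int) (q' : List Int) (h' : Int)
    (hw : 1 ≤ w) (hm : 0 ≤ m) (hh : 0 ≤ h) (hlen : h.toNat ≤ q.length)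
    (hq : q.drop h.toNat = pvAct g (max (m - w) 0) m)
    (hq'def : q' = pvPopWhile h (fun j => decide (g j ≤ g m)) q ++ [m])
    (hh'def : h' = if PySem.List.pyGetD q' h 0 < m - w + 1 then h + 1 else h) :
    0 ≤ h' ∧ h'.toNat ≤ q'.length ∧
      q'.drop h'.toNat = pvAct g (max (m + 1 - w) 0) (m + 1) := by
  subst hh'def
  have hlo0 : (0:Int) ≤ max (m - w) 0 := le_max_right _ _
  have hlom : max (m - w) 0 ≤ m := by omega
  have hsucc : pvAct g (max (m - w) 0) (m + 1)
      = (pvAct g (max (m - w) 0) m).filter (fun j => decide (g m < g j)) ++ [m] :=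
    pv_pvAct_succ g _ m hlom
  have htl : (q.take h.toNat).length = h.toNat := by
    rw [List.length_take]; omega
  have hq' : q' = q.take h.toNat ++ ((pvAct g (max (m - w) 0) m).filter
      (fun j => decide (g m < g j)) ++ [m]) := by
    rw [hq'def, pv_pop_drop g m h q _ _ hh hlen hq, List.append_assoc]
  have hdrop' : q'.drop h.toNat = pvAct g (max (m - w) 0) (m + 1) := by
    rw [hq', hsucc, List.drop_left' htl]
  obtain ⟨a, t, hat, ⟨ha1, ha2⟩, hadom⟩ :=
    pv_pvAct_head g (max (m - w) 0) (m + 1) (by omega)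
  have hfront : PySem.List.pyGetD q' h 0 = a :=
    pv_front q' h a t hh (by rw [hdrop', hat])
  have hfilter : pvAct g (max (m + 1 - w) 0) (m + 1)
      = (pvAct g (max (m - w) 0) (m + 1)).filter (fun j => decide (max (m + 1 - w) 0 ≤ j)) :=
    pv_pvAct_mono_lo g _ _ _ (by omega) (by omega)
  have hsorted := pv_pvAct_sorted g (max (m - w) 0) (m + 1)
  rw [hat] at hsorted
  have htgt : ∀ x ∈ t, a < x := (List.pairwise_cons.mp hsorted).1
  have hq'len : h.toNat + 1 ≤ q'.length := by
    have : (q'.drop h.toNat).length = q'.length - h.toNat := by rw [List.length_drop]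
    rw [hdrop', hat] at this
    simp at this
    omega
  by_cases hcond : PySem.List.pyGetD q' h 0 < m - w + 1
  · rw [if_pos hcond]
    rw [hfront] at hcond
    have haw : a < m + 1 - w := by omega
    have hlo'pos : max (m + 1 - w) 0 = m + 1 - w := by omega
    refine ⟨by omega, by omega, ?_⟩
    rw [hfilter, hat]
    have hfa : (a :: t).filter (fun j => decide (max (m + 1 - w) 0 ≤ j)) = t := by
      rw [List.filter_cons, if_neg (by simp; omega)]
      apply List.filter_eq_self.mpr
      intro b hb
      have hab := htgt b hb
      have hbmem : b ∈ pvAct g (max (m - w) 0) (m + 1) := by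
        rw [hat]; exact List.mem_cons_of_mem _ hb
      have hblo := ((pv_mem_pvAct g _ _ b).mp hbmem).1.1
      simp only [decide_eq_true_eq]
      omega
    rw [hfa, show (h + 1).toNat = h.toNat + 1 by omega, ← List.drop_drop, hdrop', hat]
    rfl
  · rw [if_neg hcond]
    rw [hfront] at hcond
    have haw : max (m + 1 - w) 0 ≤ a := by omega
    refine ⟨by omega, by omega, ?_⟩
    rw [hdrop', hfilter, hat]
    symm
    rw [List.filter_cons, if_pos (by simpa using haw)]
    congr 1
    apply List.filter_eq_self.mpr
    intro b hb
    have := htgt b hb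
    simp only [decide_eq_true_eq]
    omega

-- the main single-pass invariant: after m steps the output lists are the filters up to m,
-- and both deques carry the live lists of their value maps
lemma pv_foldB (prices : List Int) (s : Int) (hs : 0 ≤ s) (mN : Nat) :
    ∃ (maxq minq : List Int) (hmax hmin : Int),
      (PySem.List.pyRange 0 (mN : Int) 1).foldl (pvStepB prices s (2 * s + 1)) ([], 0, [], 0, [], [])
        = (maxq, hmax, minq, hmin,
           (PySem.List.pyRange s ((mN : Int) - s) 1).filter (pvPeak prices s),
           (PySem.List.pyRange s ((mN : Int) - s) 1).filter (pvTrough prices s))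
      ∧ 0 ≤ hmax ∧ hmax.toNat ≤ maxq.length
      ∧ maxq.drop hmax.toNat
          = pvAct (fun j => PySem.List.pyGetD prices j 0) (max ((mN : Int) - (2 * s + 1)) 0) mN
      ∧ 0 ≤ hmin ∧ hmin.toNat ≤ minq.length
      ∧ minq.drop hmin.toNat
          = pvAct (fun j => -(PySem.List.pyGetD prices j 0)) (max ((mN : Int) - (2 * s + 1)) 0) mN := by
  induction mN with
  | zero =>
    refine ⟨[], [], 0, 0, ?_, by omega, by simp, ?_, by omega, by simp, ?_⟩
    · rw [PySem.List.pyRange_one_eq_nil (by omega), PySem.List.pyRange_one_eq_nil (by omega)]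
      rfl
    · rw [show max ((0:Nat) - (2 * s + 1) : Int) 0 = 0 by omega]
      simp [pvAct, PySem.List.pyRange_one_eq_nil]
    · rw [show max ((0:Nat) - (2 * s + 1) : Int) 0 = 0 by omega]
      simp [pvAct, PySem.List.pyRange_one_eq_nil]
  | succ mN ih =>
    obtain ⟨maxq, minq, hmax, hmin, heq, hx0, hxl, hxd, hn0, hnl, hnd⟩ := ih
    have hw : (1:Int) ≤ 2 * s + 1 := by omega
    have hm0 : (0:Int) ≤ (mN : Int) := by omega
    have hcast : ((mN + 1 : Nat) : Int) = (mN : Int) + 1 := by push_cast; ring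
    have hrange : PySem.List.pyRange 0 ((mN + 1 : Nat) : Int) 1
        = PySem.List.pyRange 0 (mN : Int) 1 ++ [(mN : Int)] := by
      rw [hcast]
      exact PySem.List.pyRange_one_succ_right hm0
    rw [hrange, List.foldl_append, heq]
    simp only [List.foldl_cons, List.foldl_nil]
    simp only [pvStepB]
    -- align the min-deque pop condition with its value map gN j = -(prices[j])
    have hcondN : (fun j => decide (PySem.List.pyGetD prices (mN:Int) 0 ≤ PySem.List.pyGetD prices j 0))
        = (fun j => decide (-(PySem.List.pyGetD prices j 0) ≤ -(PySem.List.pyGetD prices (mN:Int) 0))) := by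
      funext j
      exact decide_eq_decide.mpr ⟨fun h => by omega, fun h => by omega⟩
    rw [hcondN]
    set MQ := pvPopWhile hmax
      (fun j => decide (PySem.List.pyGetD prices j 0 ≤ PySem.List.pyGetD prices (mN:Int) 0)) maxq
      ++ [(mN:Int)] with hMQ
    set NQ := pvPopWhile hmin
      (fun j => decide (-(PySem.List.pyGetD prices j 0) ≤ -(PySem.List.pyGetD prices (mN:Int) 0))) minq
      ++ [(mN:Int)] with hNQ
    set HM := if PySem.List.pyGetD MQ hmax 0 < (mN:Int) - (2*s+1) + 1 then hmax + 1 else hmax with hHM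
    set HN := if PySem.List.pyGetD NQ hmin 0 < (mN:Int) - (2*s+1) + 1 then hmin + 1 else hmin with hHN
    obtain ⟨hx0', hxl', hxd'⟩ :=
      pv_dstep (fun j => PySem.List.pyGetD prices j 0) (2*s+1) (mN:Int) hmax maxq MQ HM
        hw hm0 hx0 hxl hxd hMQ hHM
    obtain ⟨hn0', hnl', hnd'⟩ :=
      pv_dstep (fun j => -(PySem.List.pyGetD prices j 0)) (2*s+1) (mN:Int) hmin minq NQ HN
        hw hm0 hn0 hnl hnd hNQ hHN
    by_cases hfull : 0 ≤ (mN:Int) - (2*s+1) + 1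
    · rw [if_pos hfull]
      have hlo' : max ((mN:Int) + 1 - (2*s+1)) 0 = (mN:Int) - 2*s := by omega
      obtain ⟨a1, t1, hat1, ⟨ha11, ha12⟩, hdom1⟩ :=
        pv_pvAct_head (fun j => PySem.List.pyGetD prices j 0)
          (max ((mN:Int) + 1 - (2*s+1)) 0) ((mN:Int) + 1) (by omega)
      obtain ⟨a2, t2, hat2, ⟨ha21, ha22⟩, hdom2⟩ :=
        pv_pvAct_head (fun j => -(PySem.List.pyGetD prices j 0))
          (max ((mN:Int) + 1 - (2*s+1)) 0) ((mN:Int) + 1) (by omega)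
      have hf1 : PySem.List.pyGetD MQ HM 0 = a1 :=
        pv_front MQ HM a1 t1 hx0' (by rw [hxd', hat1])
      have hf2 : PySem.List.pyGetD NQ HN 0 = a2 :=
        pv_front NQ HN a2 t2 hn0' (by rw [hnd', hat2])
      rw [hlo'] at hdom1 hdom2 ha11 ha21
      -- the peak / trough tests against the deque fronts are the window characterisations
      have hpk : (PySem.List.pyGetD prices ((mN:Int) - s) 0 = PySem.List.pyGetD prices a1 0)
          ↔ (pvPeak prices s ((mN:Int) - s) = true) := by
        constructor
        · intro hEq
          simp only [pvPeak, List.all_eq_true, decide_eq_true_eq]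
          intro j hj
          have hj' := PySem.List.mem_pyRange_one.mp hj
          have := hdom1 j (by omega) (by omega)
          omega
        · intro hall
          simp only [pvPeak, List.all_eq_true, decide_eq_true_eq] at hall
          have h1 : PySem.List.pyGetD prices a1 0 ≤ PySem.List.pyGetD prices ((mN:Int) - s) 0 :=
            hall a1 (PySem.List.mem_pyRange_one.mpr ⟨by omega, by omega⟩)
          have h2 := hdom1 ((mN:Int) - s) (by omega) (by omega)
          omega
      have htr : (PySem.List.pyGetD prices ((mN:Int) - s) 0 = PySem.List.pyGetD prices a2 0)
          ↔ (pvTrough prices s ((mN:Int) - s) = true) := by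
        constructor
        · intro hEq
          simp only [pvTrough, List.all_eq_true, decide_eq_true_eq]
          intro j hj
          have hj' := PySem.List.mem_pyRange_one.mp hj
          have := hdom2 j (by omega) (by omega)
          omega
        · intro hall
          simp only [pvTrough, List.all_eq_true, decide_eq_true_eq] at hall
          have h1 : PySem.List.pyGetD prices ((mN:Int) - s) 0 ≤ PySem.List.pyGetD prices a2 0 :=
            hall a2 (PySem.List.mem_pyRange_one.mpr ⟨by omega, by omega⟩)
          have h2 := hdom2 ((mN:Int) - s) (by omega) (by omega)
          omega
      have hrange2 : PySem.List.pyRange s (((mN + 1 : Nat) : Int) - s) 1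
          = PySem.List.pyRange s ((mN:Int) - s) 1 ++ [(mN:Int) - s] := by
        rw [hcast, show (mN:Int) + 1 - s = ((mN:Int) - s) + 1 by ring]
        exact PySem.List.pyRange_one_succ_right (by omega)
      refine ⟨MQ, NQ, HM, HN, ?_, hx0', hxl', by rw [hxd', hcast], hn0', hnl', by rw [hnd', hcast]⟩
      rw [hrange2, List.filter_append, List.filter_append]
      simp only [List.filter_cons, List.filter_nil]
      rw [hf1, hf2]
      refine congrArg₂ _ rfl (congrArg₂ _ rfl (congrArg₂ _ rfl (congrArg₂ _ rfl (congrArg₂ _ ?_ ?_))))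
      · by_cases hp : pvPeak prices s ((mN:Int) - s) = true
        · rw [if_pos (hpk.mpr hp), if_pos hp]
        · rw [if_neg (fun hc => hp (hpk.mp hc)), if_neg (by simpa using hp)]; simp
      · by_cases hp : pvTrough prices s ((mN:Int) - s) = true
        · rw [if_pos (htr.mpr hp), if_pos hp]
        · rw [if_neg (fun hc => hp (htr.mp hc)), if_neg (by simpa using hp)]; simp
    · rw [if_neg hfull]
      have hr1 : PySem.List.pyRange s (((mN + 1 : Nat) : Int) - s) 1 = [] := by
        rw [hcast]
        exact PySem.List.pyRange_one_eq_nil (by omega)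
      have hr2 : PySem.List.pyRange s ((mN : Int) - s) 1 = [] :=
        PySem.List.pyRange_one_eq_nil (by omega)
      refine ⟨MQ, NQ, HM, HN, ?_, hx0', hxl', by rw [hxd', hcast], hn0', hnl', by rw [hnd', hcast]⟩
      rw [hr1, hr2]

lemma pv_B_eq_filter (prices : List Int) (s : Int) (hs : 0 ≤ s) :
    find_peaks_and_troughs_alt prices s
      = ((PySem.List.pyRange s ((prices.length : Int) - s) 1).filter (pvPeak prices s),
         (PySem.List.pyRange s ((prices.length : Int) - s) 1).filter (pvTrough prices s)) := by
  unfold find_peaks_and_troughs_alt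
  obtain ⟨maxq, minq, hmax, hmin, heq, -⟩ := pv_foldB prices s hs prices.length
  dsimp only
  rw [heq]

-- ===== VERDICT (by name: the statement is the Claim_ definition above) =====
theorem find_peaks_and_troughs_spec : Claim_equal_find_peaks_and_troughs := by
  intro prices s hdom hs
  unfold Spec_find_peaks_and_troughs
  rw [pv_A_eq_filter prices s hs, pv_B_eq_filter prices s hs]
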